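-- pv_equiv track=rewrite | github.com/lbbelak/rigoro_final | words_chain.py | word_chain
-- ===== SOURCE A (Python) =====
-- from typing import Set
--
-- def word_chain(words: Set[str]):
--     biggest = 0
--     for word in words:
--         to_match = words.copy()
--         if len(to_match) != 1:
--             to_match.remove(word)
--         candidate = words_rec(word, to_match, 1)
--         if candidate > biggest:
--             biggest = candidate
--         if biggest == len(words):
--             break
--     return biggest
--
-- def words_rec(actual: str, words: Set[str], biggest_all) -> int:
--     biggest = biggest_all
--     for word in words:
--         if word[0] == actual[-1]:
--             if len(words) != 1:
--                 to_match = words.copy()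
--                 to_match.remove(word)
--                 candidate = words_rec(word, to_match, biggest_all + 1)
--                 if candidate > biggest:
--                     biggest = candidate
--             else:
--                 biggest += 1
--     return biggest
-- ===== SOURCE B (Python) =====
-- def word_chain(words):
--     ws = list(words)
--     n = len(ws)
--     memo = {}
--
--     def dfs(i, mask):
--         key = (i, mask)
--         if key in memo:
--             return memo[key]
--         best = 1
--         last = ws[i][-1]
--         for j in range(n):
--             if not (mask >> j) & 1 and ws[j][0] == last:
--                 c = 1 + dfs(j, mask | (1 << j))
--                 if c > best:
--                     best = c
--         memo[key] = best
--         return best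
--
--     biggest = 0
--     for i in range(n):
--         c = dfs(i, 1 << i)
--         if c > biggest:
--             biggest = c
--     return biggest
-- ===== Notes on version B (the rewrite author's own statement) =====
-- stated objective: alternative
-- what changed: Replaces A's plain exhaustive recursion over shrinking set copies by a depth-first search over (last word index, visited bitmask) states with a memo dictionary, so each reachable state is solved once instead of once per path leading to it.
-- intended difference: On a one-word set whose word starts and ends with the same letter A returns 2 (it never removes the word from the candidate set when the set is a singleton, so the word chains with itself); B returns 1, the intended length of a chain made of one word. — e.g. on word_chain(["aa"]): A returns 2, B returns 1
import Mathlib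
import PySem

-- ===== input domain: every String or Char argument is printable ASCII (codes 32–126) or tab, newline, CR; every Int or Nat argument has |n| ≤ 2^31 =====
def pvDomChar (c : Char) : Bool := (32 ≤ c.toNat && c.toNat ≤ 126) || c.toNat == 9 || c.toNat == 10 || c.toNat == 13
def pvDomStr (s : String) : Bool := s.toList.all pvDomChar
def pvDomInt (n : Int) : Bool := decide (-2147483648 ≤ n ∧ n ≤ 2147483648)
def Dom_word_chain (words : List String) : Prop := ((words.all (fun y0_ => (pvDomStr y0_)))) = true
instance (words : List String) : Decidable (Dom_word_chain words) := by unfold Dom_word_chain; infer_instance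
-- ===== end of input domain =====

-- B replaces A's plain exhaustive recursion over shrinking set copies by a memoized depth-first search
-- over (last word, visited bitmask) states; B also returns the intended value 1 (not A's 2) on a
-- singleton set whose word starts and ends with the same letter.  Both versions iterate a Python set
-- only to take a maximum (with a break at the provable global maximum), so the result does not depend
-- on the set's iteration order and the ports iterate the list representative.

-- ===== PORT A =====

-- word[0] == actual[-1]  (Option equality; on the admitted inputs both sides are `some`)
def pvMatch (word actual : String) : Bool :=
  PySem.Str.pyGet? word 0 == PySem.Str.pyGet? actual (-1)

-- port of words_rec; the fuel argument is only a totality guard for the recursion depth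
-- (Python's recursion terminates because the set shrinks; every call below gets enough fuel)
def wordsRecF : Nat → String → List String → Int → Int
  | 0, _, _, biggestAll => biggestAll
  | fuel + 1, actual, ws, biggestAll =>
    ws.foldl (fun biggest word =>
      if pvMatch word actual then
        if ws.length ≠ 1 then
          let cand := wordsRecF fuel word (ws.erase word) (biggestAll + 1)
          if cand > biggest then cand else biggest
        else biggest + 1
      else biggest) biggestAll

-- the 'for word in words' loop of word_chain, with the early 'break'
def wordChainGo (words : List String) : List String → Int → Int
  | [], biggest => biggest
  | word :: rest, biggest =>
    let toMatch := if words.length ≠ 1 then words.erase word else words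
    let candidate := wordsRecF words.length word toMatch 1
    let biggest' := if candidate > biggest then candidate else biggest
    if biggest' = (words.length : Int) then biggest'
    else wordChainGo words rest biggest'

def word_chain (words : List String) : Int := wordChainGo words words 0

-- ===== PORT B =====

-- dfs(i, mask): longest chain starting at ws[i] avoiding the visited indices of mask, memoized;
-- the inner 'for j in range(n)' loop threads (best, memo) through a fold; the fuel argument is
-- only a totality guard (each recursive call sets one more mask bit, so fuel = n is enough)
def dfsBF : Nat → List String → Nat → Nat → Nat → PySem.Dict (Nat × Nat) Int →
    Int × PySem.Dict (Nat × Nat) Int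
  | 0, _, _, _, _, memo => (1, memo)
  | fuel + 1, ws, n, i, mask, memo =>
    match memo.get? (i, mask) with
    | some v => (v, memo)
    | none =>
      let last := PySem.Str.pyGet? (ws.getD i "") (-1)
      let r := (List.range n).foldl
        (fun (acc : Int × PySem.Dict (Nat × Nat) Int) j =>
          if ((mask >>> j) &&& 1 == 0) && (PySem.Str.pyGet? (ws.getD j "") 0 == last) then
            let r2 := dfsBF fuel ws n j (mask ||| (1 <<< j)) acc.2
            let c := 1 + r2.1
            (if c > acc.1 then c else acc.1, r2.2)
          else acc) (1, memo)
      (r.1, r.2.insert (i, mask) r.1)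

-- top-level loop of B: best chain over every starting word, threading the memo table
def word_chain_alt (words : List String) : Int :=
  ((List.range words.length).foldl
    (fun (acc : Int × PySem.Dict (Nat × Nat) Int) i =>
      let r := dfsBF words.length words words.length i (1 <<< i) acc.2
      (if r.1 > acc.1 then r.1 else acc.1, r.2)) ((0 : Int), PySem.Dict.empty)).1

-- ===== PRECONDITION & SPEC =====

-- Pre_ excludes sets containing the empty string (A raises IndexError on word[0]/word[-1] there) and
-- duplicate entries (the parameter is a Python set; its List encoding holds distinct elements).
def Pre_word_chain (words : List String) : Prop :=
  words.Nodup ∧ ∀ w ∈ words, w ≠ ""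

instance (words : List String) : Decidable (Pre_word_chain words) := by
  unfold Pre_word_chain; infer_instance

def pvWitness_word_chain : List String := ["ab", "bc"]

-- On a singleton set whose word is nonempty and starts and ends with the same letter, A returns 2
-- (it never removes the word from the candidate set when the set is a singleton, so the word chains
-- with itself); B returns 1, the intended length of a chain made of one word.
def D_word_chain (words : List String) : Prop :=
  words.length = 1 ∧ words.headD "" ≠ "" ∧
    PySem.Str.pyGet? (words.headD "") 0 = PySem.Str.pyGet? (words.headD "") (-1)

instance (words : List String) : Decidable (D_word_chain words) := by
  unfold D_word_chain; infer_instance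

def Spec_word_chain (words : List String) (out : Int) : Prop :=
  ¬ D_word_chain words → out = word_chain_alt words

instance (words : List String) (out : Int) : Decidable (Spec_word_chain words out) := by
  unfold Spec_word_chain; infer_instance

def pvDiffWitness_word_chain : List String := ["aa"]

def pvDiffWitnessOut_word_chain : Int × Int := (2, 1)

-- ===== CLAIM (what is proved, stated in full; the proofs are below) =====

def Claim_unchanged_word_chain : Prop := ∀ (words : List String), Dom_word_chain words →
  Pre_word_chain words → Spec_word_chain words (word_chain words)

def Claim_changed_word_chain : Prop := Dom_word_chain (pvDiffWitness_word_chain) ∧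
  Pre_word_chain (pvDiffWitness_word_chain) ∧ D_word_chain (pvDiffWitness_word_chain) ∧
  word_chain (pvDiffWitness_word_chain) = pvDiffWitnessOut_word_chain.1 ∧
  word_chain_alt (pvDiffWitness_word_chain) = pvDiffWitnessOut_word_chain.2 ∧
  pvDiffWitnessOut_word_chain.1 ≠ pvDiffWitnessOut_word_chain.2

def Claim_exact_word_chain : Prop := ∀ (words : List String), Dom_word_chain words →
  Pre_word_chain words → D_word_chain words → word_chain words ≠ word_chain_alt words

-- ===== LEMMAS AND PROOFS =====

-- max of a list of Ints, floored at 0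
def pvListMax (l : List Int) : Int := l.foldr max 0

-- length of the longest nonempty chain w₁ … wₘ of distinct elements of S with w₁ matching `a`
def chainF (S : List String) (a : String) : Int :=
  pvListMax (S.attach.map (fun x =>
    if pvMatch x.1 a then 1 + chainF (S.erase x.1) x.1 else 0))
termination_by S.length
decreasing_by
  have h1 := List.length_erase_of_mem x.2
  have h2 := List.length_pos_of_mem x.2
  omega

theorem chainF_def (S : List String) (a : String) :
    chainF S a = pvListMax (S.map (fun w => if pvMatch w a then 1 + chainF (S.erase w) w else 0)) := by
  rw [chainF]
  congr 1
  exact @List.attach_map_val _ _ S (fun w => if pvMatch w a then 1 + chainF (S.erase w) w else 0)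

theorem pvListMax_nonneg (l : List Int) : 0 ≤ pvListMax l := by
  induction l with
  | nil => simp [pvListMax]
  | cons x t ih => simp only [pvListMax, List.foldr] at *; omega

theorem pvListMax_cons (x : Int) (l : List Int) : pvListMax (x :: l) = max x (pvListMax l) := rfl

theorem pvListMax_le (l : List Int) (b : Int) (hb : 0 ≤ b) (h : ∀ x ∈ l, x ≤ b) :
    pvListMax l ≤ b := by
  induction l with
  | nil => simpa [pvListMax]
  | cons x t ih =>
    rw [pvListMax_cons]
    have := h x (by simp)
    have := ih (fun y hy => h y (by simp [hy]))
    omega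

theorem chainF_nonneg (S : List String) (a : String) : 0 ≤ chainF S a := by
  rw [chainF_def]; exact pvListMax_nonneg _

theorem chainF_empty (a : String) : chainF [] a = 0 := by
  rw [chainF_def]; rfl

theorem chainF_singleton' (w a : String) : chainF [w] a = if pvMatch w a then 1 else 0 := by
  rw [chainF_def]
  simp [pvListMax, List.erase_cons_head, chainF_empty]
  split_ifs <;> simp

theorem chainF_le (S : List String) (a : String) : chainF S a ≤ S.length := by
  induction hn : S.length using Nat.strong_induction_on generalizing S a with
  | _ n ih =>
    subst hn
    rw [chainF_def]
    apply pvListMax_le _ _ (by omega)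
    intro x hx
    simp only [List.mem_map] at hx
    obtain ⟨w, hw, rfl⟩ := hx
    have he := List.length_erase_of_mem hw
    have hp := List.length_pos_of_mem hw
    split_ifs with hm
    · have := ih (S.erase w).length (by omega) (S.erase w) w rfl
      omega
    · omega

theorem wordsRecF_eq (fuel : Nat) : ∀ (S : List String) (a : String) (k : Int),
    S.length ≤ fuel → wordsRecF fuel a S k = k + chainF S a := by
  induction fuel with
  | zero =>
    intro S a k h
    have hS : S = [] := List.eq_nil_of_length_eq_zero (by omega)
    subst hS
    rw [wordsRecF, chainF_empty]
    omega
  | succ fuel ih =>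
    intro S a k hle
    by_cases hlen : S.length = 1
    · obtain ⟨w, rfl⟩ : ∃ w, S = [w] := by
        match S, hlen with | [w], _ => exact ⟨w, rfl⟩
      rw [wordsRecF, chainF_singleton']
      simp only [List.foldl_cons, List.foldl_nil, List.length_cons, List.length_nil, ne_eq]
      norm_num
      split_ifs <;> omega
    · have go_spec : ∀ (pending : List String) (b : Int), (∀ w ∈ pending, w ∈ S) → k ≤ b →
          pending.foldl (fun biggest word =>
            if pvMatch word a then
              (if wordsRecF fuel word (S.erase word) (k + 1) > biggest
               then wordsRecF fuel word (S.erase word) (k + 1) else biggest)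
            else biggest) b
            = max b (k + pvListMax (pending.map
                (fun w => if pvMatch w a then 1 + chainF (S.erase w) w else 0))) := by
        intro pending
        induction pending with
        | nil =>
          intro b _ hb
          simp only [List.foldl_nil, List.map_nil]
          have : pvListMax [] = 0 := rfl
          omega
        | cons word rest ihp =>
          intro b hmem hb
          have hw : word ∈ S := hmem word (by simp)
          have he := List.length_erase_of_mem hw
          have hp := List.length_pos_of_mem hw
          have hrec : wordsRecF fuel word (S.erase word) (k + 1)
              = (k + 1) + chainF (S.erase word) word :=
            ih (S.erase word) word (k + 1) (by omega)
          have h0 : (0 : Int) ≤ chainF (S.erase word) word := chainF_nonneg _ _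
          have h1 : (0 : Int) ≤ pvListMax (rest.map
              (fun w => if pvMatch w a then 1 + chainF (S.erase w) w else 0)) :=
            pvListMax_nonneg _
          simp only [List.foldl_cons, hrec, List.map_cons, pvListMax_cons]
          split_ifs with hm hgt
          · rw [ihp _ (fun x hx => hmem x (by simp [hx])) (by omega)]
            omega
          · rw [ihp _ (fun x hx => hmem x (by simp [hx])) hb]
            omega
          · rw [ihp _ (fun x hx => hmem x (by simp [hx])) hb]
            omega
      rw [wordsRecF,
        PySem.List.foldl_congr_mem S _ (fun biggest word =>
            if pvMatch word a then
              (if wordsRecF fuel word (S.erase word) (k + 1) > biggest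
               then wordsRecF fuel word (S.erase word) (k + 1) else biggest)
            else biggest) k
          (by intro acc x _; simp only [hlen, ite_not, if_false]),
        go_spec S k (fun _ h => h) le_rfl, ← chainF_def]
      have := chainF_nonneg S a
      omega

-- ===== B-side machinery =====

-- the Python bit test '(m >> k) & 1 == 0' reads bit k
theorem pvBitz (m k : Nat) : ((m >>> k) &&& 1 == 0) = !m.testBit k := by
  simp only [Nat.testBit, Nat.and_one_is_mod, Nat.one_and_eq_mod_two]
  rcases Nat.mod_two_eq_zero_or_one (m >>> k) with h | h <;> simp [h]

theorem pvBitOr (mask j k : Nat) :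
    (((mask ||| (1 <<< j)) >>> k) &&& 1 == 0) = (((mask >>> k) &&& 1 == 0) && (k != j)) := by
  rw [pvBitz, pvBitz, Nat.testBit_or, Nat.one_shiftLeft, Nat.testBit_two_pow]
  by_cases hkj : j = k
  · subst hkj; simp
  · have h2 : (decide (j = k)) = false := by simp [hkj]
    have h3 : (k != j) = true := by simp [bne]; exact fun h => hkj h.symm
    simp [h2, h3]

-- number of indices j < n whose bit is clear in mask (the induction measure of the DFS)
def pvFree (n mask : Nat) : Nat :=
  ((List.range n).filter (fun j => (mask >>> j) &&& 1 == 0)).length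

theorem pvFree_lt (n mask j : Nat) (hj : j < n) (hbit : (mask >>> j) &&& 1 = 0) :
    pvFree n (mask ||| (1 <<< j)) < pvFree n mask := by
  unfold pvFree
  have hpt : ∀ k ∈ List.range n,
      (((mask ||| (1 <<< j)) >>> k) &&& 1 == 0) = (((mask >>> k) &&& 1 == 0) && (k != j)) :=
    fun k _ => pvBitOr mask j k
  rw [List.filter_congr hpt]
  have hnd : ((List.range n).filter (fun k => (mask >>> k) &&& 1 == 0)).Nodup :=
    List.Nodup.filter _ List.nodup_range
  have hmem : j ∈ (List.range n).filter (fun k => (mask >>> k) &&& 1 == 0) := by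
    simp only [List.mem_filter, List.mem_range]
    exact ⟨hj, by simp [hbit]⟩
  have heq : (List.range n).filter (fun k => ((mask >>> k) &&& 1 == 0) && (k != j))
      = ((List.range n).filter (fun k => (mask >>> k) &&& 1 == 0)).erase j := by
    rw [List.Nodup.erase_eq_filter hnd, List.filter_filter]
    exact List.filter_congr (by intro k _; exact Bool.and_comm _ _)
  rw [heq, List.length_erase_of_mem hmem]
  have := List.length_pos_of_mem hmem
  omega

theorem pvFree_zero (n : Nat) : pvFree n 0 = n := by
  unfold pvFree
  rw [List.filter_eq_self.mpr (by intro a _; simp), List.length_range]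

theorem pvFree_le_fuel (n : Nat) (i : Nat) (hi : i < n) : pvFree n (1 <<< i) < n := by
  have h := pvFree_lt n 0 i hi (by simp)
  rwa [Nat.zero_or, pvFree_zero] at h

def pvIdxs (n mask : Nat) : List Nat := (List.range n).filter (fun j => !(Nat.testBit mask j))

def pvAvail (ws : List String) (mask : Nat) : List String :=
  (pvIdxs ws.length mask).map (fun j => ws.getD j "")

def pvVal (ws : List String) (i mask : Nat) : Int :=
  1 + chainF (pvAvail ws mask) (ws.getD i "")

def GoodM (ws : List String) (memo : PySem.Dict (Nat × Nat) Int) : Prop :=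
  ∀ p v, memo.get? p = some v → v = pvVal ws p.1 p.2

theorem pvMapEraseOn (f : Nat → String) :
    ∀ (l : List Nat) (j : Nat), j ∈ l → (∀ x ∈ l, ∀ y ∈ l, f x = f y → x = y) →
      (l.map f).erase (f j) = (l.erase j).map f := by
  intro l
  induction l with
  | nil => intro j hj; simp at hj
  | cons x rest ihl =>
    intro j hj hinj
    by_cases hx : x = j
    · subst hx
      simp [List.erase_cons_head]
    · have hfx : (f x == f j) = false := by
        simp only [beq_eq_false_iff_ne, ne_eq]
        intro heq
        exact hx (hinj x (by simp) j hj heq)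
      have hjr : j ∈ rest := by
        rcases List.mem_cons.mp hj with h | h
        · exact absurd h.symm hx
        · exact h
      have hxr : (x == j) = false := by simp [hx]
      simp only [List.map_cons, List.erase_cons, hfx, hxr, Bool.false_eq_true, if_false]
      rw [ihl j hjr (fun a ha b hb => hinj a (by simp [ha]) b (by simp [hb]))]

theorem pvIdxs_lt (n mask j : Nat) (h : j ∈ pvIdxs n mask) : j < n := by
  unfold pvIdxs at h
  exact List.mem_range.mp (List.mem_filter.mp h).1

theorem pvGetD_inj (ws : List String) (hnd : ws.Nodup) (x y : Nat)
    (hx : x < ws.length) (hy : y < ws.length)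
    (h : ws.getD x "" = ws.getD y "") : x = y := by
  rw [List.getD_eq_getElem ws "" hx, List.getD_eq_getElem ws "" hy] at h
  exact (List.Nodup.getElem_inj_iff hnd).mp h

theorem pvIdxs_shift (n mask j : Nat) (_hj : j < n) (_hb : Nat.testBit mask j = false) :
    pvIdxs n (mask ||| (1 <<< j)) = (pvIdxs n mask).erase j := by
  unfold pvIdxs
  have hpt : ∀ k ∈ List.range n,
      (!(Nat.testBit (mask ||| (1 <<< j)) k)) = ((!(Nat.testBit mask k)) && (k != j)) := by
    intro k _
    have := pvBitOr mask j k
    rwa [pvBitz, pvBitz] at this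
  rw [List.filter_congr hpt]
  have hnd : ((List.range n).filter (fun k => !(Nat.testBit mask k))).Nodup :=
    List.Nodup.filter _ List.nodup_range
  rw [List.Nodup.erase_eq_filter hnd, List.filter_filter]
  exact List.filter_congr (by intro k _; exact Bool.and_comm _ _)

theorem pvAvail_shift (ws : List String) (hnd : ws.Nodup) (mask j : Nat)
    (hj : j < ws.length) (hb : Nat.testBit mask j = false) :
    pvAvail ws (mask ||| (1 <<< j)) = (pvAvail ws mask).erase (ws.getD j "") := by
  unfold pvAvail
  rw [pvIdxs_shift ws.length mask j hj hb]
  have hjmem : j ∈ pvIdxs ws.length mask := by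
    unfold pvIdxs
    simp only [List.mem_filter, List.mem_range]
    exact ⟨hj, by simp [hb]⟩
  rw [pvMapEraseOn _ _ j hjmem]
  intro x hx y hy h
  exact pvGetD_inj ws hnd x y (pvIdxs_lt _ _ _ hx) (pvIdxs_lt _ _ _ hy) h

theorem pvAvail_zero (ws : List String) : pvAvail ws 0 = ws := by
  unfold pvAvail pvIdxs
  have h1 : (List.range ws.length).filter (fun j => !(Nat.testBit 0 j)) = List.range ws.length := by
    apply List.filter_eq_self.mpr
    intro a _
    simp [Nat.zero_testBit]
  rw [h1]
  apply List.ext_getElem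
  · simp
  · intro i h1 h2
    simp only [List.getElem_map, List.getElem_range]
    exact List.getD_eq_getElem ws "" (by simpa using h1)

-- the value the j-th loop iteration of dfs contributes to `best` (0 when the branch is not taken)
def pvB (ws : List String) (mask : Nat) (last : Option Char) (j : Nat) : Int :=
  if ((mask >>> j) &&& 1 == 0) && (PySem.Str.pyGet? (ws.getD j "") 0 == last)
  then 2 + chainF (pvAvail ws (mask ||| (1 <<< j))) (ws.getD j "") else 0

theorem pvListMax_filter (l : List Nat) (p : Nat → Bool) (f : Nat → Int)
    (h : ∀ k ∈ l, p k = false → f k = 0) :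
    pvListMax (l.map f) = pvListMax ((l.filter p).map f) := by
  induction l with
  | nil => rfl
  | cons x t ih =>
    have iht := ih (fun k hk => h k (by simp [hk]))
    cases hp : p x with
    | true => simp only [List.map_cons, List.filter_cons, hp, if_true, pvListMax_cons, iht]
    | false =>
      have hx : f x = 0 := h x (by simp) hp
      simp only [List.map_cons, List.filter_cons, hp, Bool.false_eq_true, if_false,
        pvListMax_cons, hx, iht]
      have h0 := pvListMax_nonneg ((t.filter p).map f)
      omega

theorem pvListMax_shift (l : List Nat) (f g : Nat → Int)
    (h : ∀ j ∈ l, (f j = 0 ∧ g j = 0) ∨ (f j = g j + 1 ∧ 0 ≤ g j)) :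
    max 1 (pvListMax (l.map f)) = 1 + pvListMax (l.map g) := by
  induction l with
  | nil =>
    have : pvListMax ([] : List Int) = 0 := rfl
    simp only [List.map_nil, this]
    omega
  | cons x t ih =>
    have iht := ih (fun j hj => h j (by simp [hj]))
    have hx := h x (by simp)
    have h1 := pvListMax_nonneg (t.map f)
    have h2 := pvListMax_nonneg (t.map g)
    simp only [List.map_cons, pvListMax_cons] at *
    omega

theorem GoodM_insert (ws : List String) (memo : PySem.Dict (Nat × Nat) Int)
    (hg : GoodM ws memo) (p : Nat × Nat) (v : Int) (hv : v = pvVal ws p.1 p.2) :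
    GoodM ws (memo.insert p v) := by
  intro q u hq
  rw [PySem.Dict.get?_insert] at hq
  split at hq
  · cases hq
    subst hv
    cases ‹q = p›
    rfl
  · exact hg q u hq

theorem pvVal_eq (ws : List String) (hnd : ws.Nodup) (i mask : Nat) (_hi : i < ws.length) :
    max 1 (pvListMax ((List.range ws.length).map
        (pvB ws mask (PySem.Str.pyGet? (ws.getD i "") (-1)))))
      = pvVal ws i mask := by
  have hdrop : pvListMax ((List.range ws.length).map
        (pvB ws mask (PySem.Str.pyGet? (ws.getD i "") (-1))))
      = pvListMax ((pvIdxs ws.length mask).map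
        (pvB ws mask (PySem.Str.pyGet? (ws.getD i "") (-1)))) := by
    apply pvListMax_filter
    intro k _ hk
    have hc : ((mask >>> k) &&& 1 == 0) = false := by
      rw [pvBitz]
      simpa using hk
    unfold pvB
    simp only [hc, Bool.false_and, Bool.false_eq_true, if_false]
  rw [hdrop]
  unfold pvVal pvAvail
  rw [chainF_def, List.map_map]
  apply pvListMax_shift
  intro j hj
  have hjn : j < ws.length := pvIdxs_lt _ _ _ hj
  have hbset : Nat.testBit mask j = false := by
    unfold pvIdxs at hj
    simpa using (List.mem_filter.mp hj).2
  have hcond : ((mask >>> j) &&& 1 == 0) = true := by rw [pvBitz, hbset]; rfl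
  have hShift := pvAvail_shift ws hnd mask j hjn hbset
  unfold pvAvail at hShift
  have hcf := chainF_nonneg ((pvIdxs ws.length (mask ||| (1 <<< j))).map
    (fun j => ws.getD j "")) (ws.getD j "")
  unfold pvB pvMatch
  unfold pvAvail
  simp only [Function.comp, hcond, Bool.true_and, hShift]
  by_cases hm : (PySem.Str.pyGet? (ws.getD j "") 0
      == PySem.Str.pyGet? (ws.getD i "") (-1)) = true
  · right
    simp only [hm, if_true]
    rw [← hShift]
    omega
  · left
    simp only [Bool.not_eq_true] at hm
    simp only [hm, Bool.false_eq_true, if_false]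
    simp

theorem dfsBF_spec (ws : List String) (hnd : ws.Nodup) :
    ∀ (fuel : Nat) (i mask : Nat) (memo : PySem.Dict (Nat × Nat) Int),
      pvFree ws.length mask < fuel → GoodM ws memo → i < ws.length →
      (dfsBF fuel ws ws.length i mask memo).1 = pvVal ws i mask ∧
      GoodM ws (dfsBF fuel ws ws.length i mask memo).2 := by
  intro fuel
  induction fuel with
  | zero => intro i mask memo hfu; omega
  | succ fuel ih =>
    intro i mask memo hfu hg hi
    rw [dfsBF]
    cases hget : memo.get? (i, mask) with
    | some v => exact ⟨hg (i, mask) v hget, hg⟩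
    | none =>
      have loop : ∀ (pending : List Nat) (acc : Int × PySem.Dict (Nat × Nat) Int),
          (∀ j ∈ pending, j < ws.length) → GoodM ws acc.2 → 0 ≤ acc.1 →
          (pending.foldl (fun acc j =>
            if ((mask >>> j) &&& 1 == 0)
                && (PySem.Str.pyGet? (ws.getD j "") 0
                    == PySem.Str.pyGet? (ws.getD i "") (-1)) then
              let r2 := dfsBF fuel ws ws.length j (mask ||| (1 <<< j)) acc.2
              let c := 1 + r2.1
              (if c > acc.1 then c else acc.1, r2.2)
            else acc) acc).1
            = max acc.1 (pvListMax (pending.map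
                (pvB ws mask (PySem.Str.pyGet? (ws.getD i "") (-1)))))
          ∧ GoodM ws ((pending.foldl (fun acc j =>
            if ((mask >>> j) &&& 1 == 0)
                && (PySem.Str.pyGet? (ws.getD j "") 0
                    == PySem.Str.pyGet? (ws.getD i "") (-1)) then
              let r2 := dfsBF fuel ws ws.length j (mask ||| (1 <<< j)) acc.2
              let c := 1 + r2.1
              (if c > acc.1 then c else acc.1, r2.2)
            else acc) acc)).2 := by
        intro pending
        induction pending with
        | nil =>
          intro acc _ hga hba
          simp only [List.foldl_nil, List.map_nil]
          have : pvListMax [] = 0 := rfl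
          exact ⟨by omega, hga⟩
        | cons j rest ihp =>
          intro acc hmem hga hba
          have hjn : j < ws.length := hmem j (by simp)
          simp only [List.foldl_cons]
          by_cases hc : (((mask >>> j) &&& 1 == 0)
              && (PySem.Str.pyGet? (ws.getD j "") 0
                  == PySem.Str.pyGet? (ws.getD i "") (-1))) = true
          · have hbit : (mask >>> j) &&& 1 = 0 := by
              have := (Bool.and_eq_true _ _).mp hc |>.1
              simpa using this
            have hlt : pvFree ws.length (mask ||| (1 <<< j)) < fuel := by
              have := pvFree_lt ws.length mask j hjn hbit
              omega
            obtain ⟨hr1, hr2⟩ := ih j (mask ||| (1 <<< j)) acc.2 hlt hga hjn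
            have hpvb : pvB ws mask (PySem.Str.pyGet? (ws.getD i "") (-1)) j
                = 2 + chainF (pvAvail ws (mask ||| (1 <<< j))) (ws.getD j "") := by
              unfold pvB; rw [if_pos hc]
            have hcf := chainF_nonneg (pvAvail ws (mask ||| (1 <<< j))) (ws.getD j "")
            rw [if_pos hc]
            obtain ⟨hrest1, hrest2⟩ := ihp
              ((if (1 : Int) + (dfsBF fuel ws ws.length j (mask ||| (1 <<< j)) acc.2).1 > acc.1
                then (1 : Int) + (dfsBF fuel ws ws.length j (mask ||| (1 <<< j)) acc.2).1
                else acc.1),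
               (dfsBF fuel ws ws.length j (mask ||| (1 <<< j)) acc.2).2)
              (fun x hx => hmem x (by simp [hx])) hr2
              (by dsimp only; rw [hr1]; unfold pvVal; omega)
            refine ⟨?_, hrest2⟩
            rw [hrest1]
            dsimp only
            rw [hr1]
            have h0 := pvListMax_nonneg (rest.map
              (pvB ws mask (PySem.Str.pyGet? (ws.getD i "") (-1))))
            simp only [List.map_cons, pvListMax_cons, hpvb]
            unfold pvVal
            omega
          · have hpvb : pvB ws mask (PySem.Str.pyGet? (ws.getD i "") (-1)) j = 0 := by
              unfold pvB
              rw [if_neg hc]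
            rw [if_neg hc]
            obtain ⟨hrest1, hrest2⟩ := ihp acc (fun x hx => hmem x (by simp [hx])) hga hba
            refine ⟨hrest1.trans ?_, hrest2⟩
            have h0 := pvListMax_nonneg (rest.map
              (pvB ws mask (PySem.Str.pyGet? (ws.getD i "") (-1))))
            simp only [List.map_cons, pvListMax_cons, hpvb]
            omega
      obtain ⟨hr1, hr2⟩ := loop (List.range ws.length) (1, memo)
        (fun j hj => List.mem_range.mp hj) hg (by omega)
      have hval : ((List.range ws.length).foldl (fun acc j =>
            if ((mask >>> j) &&& 1 == 0)
                && (PySem.Str.pyGet? (ws.getD j "") 0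
                    == PySem.Str.pyGet? (ws.getD i "") (-1)) then
              let r2 := dfsBF fuel ws ws.length j (mask ||| (1 <<< j)) acc.2
              let c := 1 + r2.1
              (if c > acc.1 then c else acc.1, r2.2)
            else acc) ((1 : Int), memo)).1 = pvVal ws i mask := by
        rw [hr1, ← pvVal_eq ws hnd i mask hi]
      exact ⟨hval, GoodM_insert ws _ hr2 (i, mask) _ hval⟩

theorem GoodM_empty (ws : List String) : GoodM ws PySem.Dict.empty := by
  intro p v h
  rw [PySem.Dict.get?_empty] at h
  cases h

theorem altFold_spec (ws : List String) (hnd : ws.Nodup) :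
    ∀ (idx : List Nat) (acc : Int × PySem.Dict (Nat × Nat) Int),
      GoodM ws acc.2 → (∀ i ∈ idx, i < ws.length) →
      (idx.foldl (fun acc i =>
          let r := dfsBF ws.length ws ws.length i (1 <<< i) acc.2
          (if r.1 > acc.1 then r.1 else acc.1, r.2)) acc).1
        = idx.foldl (fun b i => max b (pvVal ws i (1 <<< i))) acc.1 := by
  intro idx
  induction idx with
  | nil => intro acc _ _; rfl
  | cons i rest ihp =>
    intro acc hg hlt
    have hin : i < ws.length := hlt i (by simp)
    obtain ⟨h1, h2⟩ := dfsBF_spec ws hnd ws.length i (1 <<< i) acc.2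
      (pvFree_le_fuel ws.length i hin) hg hin
    simp only [List.foldl_cons]
    rw [ihp _ (by dsimp only; exact h2) (fun x hx => hlt x (by simp [hx]))]
    dsimp only
    rw [h1]
    congr 1
    omega

theorem pvAvail_single (ws : List String) (hnd : ws.Nodup) (i : Nat) (hi : i < ws.length) :
    pvAvail ws (1 <<< i) = ws.erase (ws.getD i "") := by
  have h0 : (0 : Nat) ||| (1 <<< i) = 1 <<< i := Nat.zero_or _
  rw [← h0, pvAvail_shift ws hnd 0 i hi (Nat.zero_testBit i), pvAvail_zero]

theorem foldl_max_stall (f : String → Int) :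
    ∀ (l : List String) (b : Int), (∀ w ∈ l, f w ≤ b) →
      l.foldl (fun b w => max b (f w)) b = b := by
  intro l
  induction l with
  | nil => intro b _; rfl
  | cons w rest ih =>
    intro b h
    have h1 := h w (by simp)
    simp only [List.foldl_cons]
    have : max b (f w) = b := by omega
    rw [this]
    exact ih b (fun x hx => h x (by simp [hx]))

theorem goA_spec (words : List String) (hlen : words.length ≠ 1) :
    ∀ (pending : List String) (b : Int), (∀ w ∈ pending, w ∈ words) → 0 ≤ b →
      b ≤ (words.length : Int) →
      wordChainGo words pending b
        = pending.foldl (fun b w => max b (1 + chainF (words.erase w) w)) b := by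
  intro pending
  induction pending with
  | nil => intro b _ _ _; rw [wordChainGo]; rfl
  | cons w rest ih =>
    intro b hmem hb0 hbn
    have hw : w ∈ words := hmem w (by simp)
    have hcle : (1 : Int) + chainF (words.erase w) w ≤ words.length := by
      have h1 := chainF_le (words.erase w) w
      have h2 := List.length_erase_of_mem hw
      have h3 := List.length_pos_of_mem hw
      omega
    have hcand : ∀ u ∈ rest, (1 : Int) + chainF (words.erase u) u ≤ words.length := by
      intro u hu
      have hu' : u ∈ words := hmem u (by simp [hu])
      have h1 := chainF_le (words.erase u) u
      have h2 := List.length_erase_of_mem hu'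
      have h3 := List.length_pos_of_mem hu'
      omega
    rw [wordChainGo]
    rw [if_pos hlen, wordsRecF_eq words.length (words.erase w) w 1
      (by have := List.length_erase_of_mem hw; omega)]
    have hite : (if 1 + chainF (words.erase w) w > b then 1 + chainF (words.erase w) w else b)
        = max b (1 + chainF (words.erase w) w) := by omega
    rw [hite]
    simp only [List.foldl_cons]
    by_cases hbreak : max b (1 + chainF (words.erase w) w) = (words.length : Int)
    · rw [if_pos hbreak, hbreak]
      exact (foldl_max_stall _ rest _ (fun u hu => by
        have := hcand u hu; omega)).symm
    · rw [if_neg hbreak]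
      exact ih _ (fun x hx => hmem x (by simp [hx])) (by omega) (by omega)

theorem pvMapRange (ws : List String) :
    (List.range ws.length).map (fun j => ws.getD j "") = ws := by
  apply List.ext_getElem
  · simp
  · intro i h1 h2
    simp only [List.getElem_map, List.getElem_range]
    exact List.getD_eq_getElem ws "" (by simpa using h1)

theorem pvMatch_self_false (w : String) (_hne : w ≠ "")
    (hd : PySem.Str.pyGet? w 0 ≠ PySem.Str.pyGet? w (-1)) : pvMatch w w = false := by
  unfold pvMatch
  exact beq_eq_false_iff_ne.mpr hd

theorem altSingleton (w : String) : word_chain_alt [w] = 1 := by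
  have hr1 : List.range ([w] : List String).length = [0] := by
    simp only [List.length_cons, List.length_nil]
    decide
  rw [word_chain_alt, hr1,
    altFold_spec [w] (by simp) [0] (0, PySem.Dict.empty) (GoodM_empty _) (by simp)]
  simp only [List.foldl_cons, List.foldl_nil]
  unfold pvVal
  have h3 : pvAvail [w] (1 <<< 0) = [] := by
    unfold pvAvail pvIdxs
    have hfil : (List.range ([w] : List String).length).filter
        (fun j => !(Nat.testBit (1 <<< 0) j)) = [] := by
      simp only [List.length_cons, List.length_nil]
      decide
    rw [hfil]
    rfl
  rw [h3, chainF_empty]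
  omega

theorem wordChainSingle (w : String) :
    word_chain [w] = if pvMatch w w then 2 else 1 := by
  rw [word_chain, wordChainGo]
  have ht : (if ([w] : List String).length ≠ 1 then [w].erase w else [w]) = [w] := by simp
  rw [ht, wordsRecF_eq ([w] : List String).length [w] w 1 (by simp), chainF_singleton']
  by_cases hm : pvMatch w w = true
  · rw [hm]
    norm_num
    rw [wordChainGo]
  · rw [Bool.not_eq_true] at hm
    rw [hm]
    norm_num

theorem main_eq (words : List String) (hpre : Pre_word_chain words)
    (hnd2 : ¬ D_word_chain words) : word_chain words = word_chain_alt words := by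
  obtain ⟨hnd, hne⟩ := hpre
  by_cases hlen : words.length = 1
  · -- singleton set
    obtain ⟨w, rfl⟩ : ∃ w, words = [w] := by
      match words, hlen with | [w], _ => exact ⟨w, rfl⟩
    have hwne : w ≠ "" := hne w (by simp)
    have hd : PySem.Str.pyGet? w 0 ≠ PySem.Str.pyGet? w (-1) := by
      intro h
      exact hnd2 ⟨rfl, by simpa using hwne, by simpa using h⟩
    have hm := pvMatch_self_false w hwne hd
    have hA : word_chain [w] = 1 := by
      rw [wordChainSingle, hm]
      norm_num
    have hB : word_chain_alt [w] = 1 := altSingleton w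
    rw [hA, hB]
  · -- the general case
    have hA : word_chain words = words.foldl
        (fun b w => max b (1 + chainF (words.erase w) w)) 0 := by
      rw [word_chain]
      exact goA_spec words hlen words 0 (fun _ h => h) le_rfl (by positivity)
    have hB : word_chain_alt words = (List.range words.length).foldl
        (fun b i => max b (pvVal words i (1 <<< i))) 0 := by
      rw [word_chain_alt]
      exact altFold_spec words hnd _ (0, PySem.Dict.empty) (GoodM_empty _)
        (fun i hi => List.mem_range.mp hi)
    rw [hA, hB]
    have hcongr : (List.range words.length).foldl
        (fun b i => max b (pvVal words i (1 <<< i))) 0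
        = (List.range words.length).foldl
        (fun b i => max b (1 + chainF (words.erase (words.getD i "")) (words.getD i ""))) 0 := by
      apply PySem.List.foldl_congr_mem
      intro acc i hi
      unfold pvVal
      rw [pvAvail_single words hnd i (List.mem_range.mp hi)]
    rw [hcongr]
    have hfold : words.foldl (fun b w => max b (1 + chainF (words.erase w) w)) 0
        = ((List.range words.length).map (fun j => words.getD j "")).foldl
            (fun b w => max b (1 + chainF (words.erase w) w)) 0 := by
      rw [pvMapRange]
    rw [hfold, List.foldl_map]

-- ===== VERDICT (by name: the statement is the Claim_ definition above) =====

theorem word_chain_spec : Claim_unchanged_word_chain := by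
  intro words _ hpre hD
  exact main_eq words hpre hD

theorem word_chain_changed : Claim_changed_word_chain := by
  unfold Claim_changed_word_chain pvDiffWitness_word_chain pvDiffWitnessOut_word_chain
  refine ⟨by decide, by decide, by decide, ?_, ?_, by decide⟩
  · rw [wordChainSingle "aa", if_pos (by decide)]
  · exact altSingleton "aa"

theorem word_chain_tight : Claim_exact_word_chain := by
  intro words _ hpre hD
  obtain ⟨hlen, hne, heq⟩ := hD
  obtain ⟨w, rfl⟩ : ∃ w, words = [w] := by
    match words, hlen with | [w], _ => exact ⟨w, rfl⟩
  simp only [List.headD] at hne heq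
  have hm : pvMatch w w = true := by
    unfold pvMatch
    exact beq_iff_eq.mpr heq
  rw [wordChainSingle w, if_pos hm, altSingleton]
  decide
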